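-- pv_equiv track=rewrite | github.com/wallter/trw-mcp | src/trw_mcp/state/validation/research_provenance.py | _scope_lines
-- ===== SOURCE A (Python) =====
-- def _scope_lines(body: str, scope_name: str) -> list[tuple[int, str]]:
--     lines = body.splitlines()
--     if scope_name != "executive_summary":
--         return [(index, line) for index, line in enumerate(lines, start=1)]
--
--     heading_index = next((index for index, line in enumerate(lines) if line.strip() == "## Executive Summary"), None)
--     if heading_index is None:
--         return []
--
--     end_index = len(lines)
--     for index in range(heading_index + 1, len(lines)):
--         if lines[index].startswith("## "):
--             end_index = index
--             break
--
--     return [(index + 1, lines[index]) for index in range(heading_index + 1, end_index)]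
-- ===== SOURCE B (Python) =====
-- def _scope_lines(body: str, scope_name: str) -> list[tuple[int, str]]:
--     lines = body.splitlines()
--     if scope_name != "executive_summary":
--         return list(enumerate(lines, start=1))
--     result = []
--     in_scope = False
--     for index, line in enumerate(lines, start=1):
--         if not in_scope:
--             if line.strip() == "## Executive Summary":
--                 in_scope = True
--         elif line.startswith("## "):
--             break
--         else:
--             result.append((index, line))
--     return result
-- ===== Notes on version B (the rewrite author's own statement) =====
-- stated objective: simpler
-- what changed: Replaces A's three phases for executive_summary (a next()-scan for the heading index, a second loop to find the end index, then a range-based comprehension re-indexing into lines) with one single pass over enumerate(lines, 1) carrying an in_scope flag and accumulating (index, line) pairs directly.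
import Mathlib
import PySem

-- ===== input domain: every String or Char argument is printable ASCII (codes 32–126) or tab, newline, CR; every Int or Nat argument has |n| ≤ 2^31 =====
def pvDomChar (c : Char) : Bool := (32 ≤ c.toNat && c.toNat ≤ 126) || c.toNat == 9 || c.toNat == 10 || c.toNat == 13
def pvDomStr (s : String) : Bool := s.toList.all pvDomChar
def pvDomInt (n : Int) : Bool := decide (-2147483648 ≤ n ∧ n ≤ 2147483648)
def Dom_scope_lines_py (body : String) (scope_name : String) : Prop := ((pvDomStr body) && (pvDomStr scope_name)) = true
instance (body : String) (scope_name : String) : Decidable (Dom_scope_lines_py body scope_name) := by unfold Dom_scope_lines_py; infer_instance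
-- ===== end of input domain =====

-- B replaces A's three phases (next()-scan for the heading, a second loop for the end
-- index, then a range comprehension re-indexing into lines) with one single pass over
-- enumerate(lines, 1) carrying an in_scope flag; objective: simpler.

-- ===== PORT A =====
-- the 'for index in range(heading_index+1, len(lines)): if lines[index].startswith("## "): end_index = index; break'
def aEndLoop (lines : List String) : List Int → Int → Int
  | [], e => e
  | j :: rest, e =>
    if PySem.Str.startswith (PySem.List.pyGetD lines j "") "## " then j
    else aEndLoop lines rest e

def scope_lines_py (body : String) (scope_name : String) : List (Int × String) :=
  let lines := PySem.Str.splitlines body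
  if scope_name ≠ "executive_summary" then
    PySem.List.enumerate lines 1
  else
    match (PySem.List.enumerate lines 0).find?
        (fun p => PySem.Str.strip p.2 == "## Executive Summary") with
    | none => []
    | some (hi, _) =>
      let endIndex := aEndLoop lines (PySem.List.pyRange (hi + 1) (lines.length : Int) 1) (lines.length : Int)
      (PySem.List.pyRange (hi + 1) endIndex 1).map
        (fun j => (j + 1, PySem.List.pyGetD lines j ""))

-- ===== PORT B =====
-- single pass with an in_scope flag and an accumulator ('break' returns the accumulator)
def bLoop : List (Int × String) → Bool → List (Int × String) → List (Int × String)
  | [], _, acc => acc.reverse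
  | (i, line) :: rest, inScope, acc =>
    if !inScope then
      if PySem.Str.strip line == "## Executive Summary" then bLoop rest true acc
      else bLoop rest false acc
    else if PySem.Str.startswith line "## " then acc.reverse
    else bLoop rest true ((i, line) :: acc)

def scope_lines_py_alt (body : String) (scope_name : String) : List (Int × String) :=
  let lines := PySem.Str.splitlines body
  if scope_name ≠ "executive_summary" then
    PySem.List.enumerate lines 1
  else
    bLoop (PySem.List.enumerate lines 1) false []

-- ===== PRECONDITION & SPEC =====
def Spec_scope_lines_py (body : String) (scope_name : String) (out : List (Int × String)) : Prop := out = scope_lines_py_alt body scope_name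
instance (body : String) (scope_name : String) (out : List (Int × String)) : Decidable (Spec_scope_lines_py body scope_name out) := by unfold Spec_scope_lines_py; infer_instance

-- ===== CLAIM (what is proved, stated in full; the proofs are below) =====
def Claim_equal_scope_lines_py : Prop := ∀ (body : String) (scope_name : String), Dom_scope_lines_py body scope_name → Spec_scope_lines_py body scope_name (scope_lines_py body scope_name)

-- ===== LEMMAS AND PROOFS =====

-- common recursive description: phase2 = inside the scope, phase1 = before the heading
def phase2 : List String → Int → List (Int × String)
  | [], _ => []
  | l :: rest, i =>
    if PySem.Str.startswith l "## " then []
    else (i, l) :: phase2 rest (i + 1)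

def phase1 : List String → Int → List (Int × String)
  | [], _ => []
  | l :: rest, i =>
    if PySem.Str.strip l == "## Executive Summary" then phase2 rest (i + 1)
    else phase1 rest (i + 1)

theorem bLoop_true (ls : List String) : ∀ (i : Int) (acc : List (Int × String)),
    bLoop (PySem.List.enumerate ls i) true acc = acc.reverse ++ phase2 ls i := by
  induction ls with
  | nil => intro i acc; simp [PySem.List.enumerate_nil, bLoop, phase2]
  | cons l rest ih =>
    intro i acc
    rw [PySem.List.enumerate_cons]
    simp only [bLoop, phase2, Bool.not_true]
    by_cases h : PySem.Str.startswith l "## " = true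
    · rw [if_neg (by decide), if_pos h, if_pos h]
      simp
    · rw [if_neg (by decide), if_neg h, if_neg h, ih]
      simp

theorem bLoop_false (ls : List String) : ∀ (i : Int) (acc : List (Int × String)),
    bLoop (PySem.List.enumerate ls i) false acc = acc.reverse ++ phase1 ls i := by
  induction ls with
  | nil => intro i acc; simp [PySem.List.enumerate_nil, bLoop, phase1]
  | cons l rest ih =>
    intro i acc
    rw [PySem.List.enumerate_cons]
    simp only [bLoop, phase1, Bool.not_false]
    by_cases h : (PySem.Str.strip l == "## Executive Summary") = true
    · rw [if_pos (by decide), if_pos h, if_pos h, bLoop_true]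
    · rw [if_pos (by decide), if_neg h, if_neg h, ih]

-- the end-scan loop's result is its default or a member of the scanned range
theorem aEndLoop_mem (lines : List String) : ∀ (r : List Int) (e : Int),
    aEndLoop lines r e = e ∨ aEndLoop lines r e ∈ r := by
  intro r
  induction r with
  | nil => intro e; left; rfl
  | cons j rest ih =>
    intro e
    simp only [aEndLoop]
    by_cases h : PySem.Str.startswith (PySem.List.pyGetD lines j "") "## " = true
    · rw [if_pos h]; right; simp
    · rw [if_neg h]
      rcases ih e with h1 | h1
      · left; exact h1
      · right; exact List.mem_cons_of_mem _ h1

theorem aEndLoop_lb (lines : List String) (s : Nat) (hs : s < lines.length) :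
    (s : Int) + 1 ≤ aEndLoop lines (PySem.List.pyRange ((s : Int) + 1) (lines.length : Int) 1) (lines.length : Int) := by
  rcases aEndLoop_mem lines (PySem.List.pyRange ((s : Int) + 1) (lines.length : Int) 1) (lines.length : Int) with h | h
  · omega
  · rw [PySem.List.mem_pyRange_one] at h; omega

-- A's range-comprehension tail equals phase2 on the corresponding suffix
theorem aTail_eq_phase2 (lines : List String) : ∀ (m s : Nat), s ≤ lines.length → lines.length - s ≤ m →
    (PySem.List.pyRange (s : Int)
        (aEndLoop lines (PySem.List.pyRange (s : Int) (lines.length : Int) 1) (lines.length : Int)) 1).map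
      (fun j => (j + 1, PySem.List.pyGetD lines j ""))
    = phase2 (lines.drop s) ((s : Int) + 1) := by
  intro m
  induction m with
  | zero =>
    intro s hs hm
    have hse : s = lines.length := by omega
    rw [hse]
    rw [PySem.List.pyRange_one_eq_nil (le_refl ((lines.length : Int)))]
    simp only [aEndLoop]
    rw [PySem.List.pyRange_one_eq_nil (le_refl ((lines.length : Int)))]
    simp [phase2]
  | succ m ih =>
    intro s hs hm
    by_cases hlt : s < lines.length
    · have h0 : (s : Int) < (lines.length : Int) := by omega
      have hget : PySem.List.pyGetD lines ((s : Int)) "" = lines[s] := by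
        rw [PySem.List.pyGetD_eq_getElem lines "" (by positivity) h0]
        simp
      have hdrop : lines.drop s = lines[s] :: lines.drop (s + 1) := List.drop_eq_getElem_cons hlt
      rw [PySem.List.pyRange_one_cons h0]
      simp only [aEndLoop, hget]
      by_cases h : PySem.Str.startswith lines[s] "## " = true
      · rw [if_pos h]
        rw [PySem.List.pyRange_one_eq_nil (le_refl ((s : Int)))]
        rw [hdrop]
        simp only [phase2]
        rw [if_pos h]
        simp
      · rw [if_neg h]
        have hlb := aEndLoop_lb lines s hlt
        rw [PySem.List.pyRange_one_cons (by omega : (s : Int) < aEndLoop lines (PySem.List.pyRange ((s : Int) + 1) (lines.length : Int) 1) (lines.length : Int))]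
        rw [List.map_cons, hget]
        have hrec := ih (s + 1) (by omega) (by omega)
        push_cast at hrec
        rw [hrec, hdrop]
        simp only [phase2]
        rw [if_neg h]
    · have hse : s = lines.length := by omega
      rw [hse]
      rw [PySem.List.pyRange_one_eq_nil (le_refl ((lines.length : Int)))]
      simp only [aEndLoop]
      rw [PySem.List.pyRange_one_eq_nil (le_refl ((lines.length : Int)))]
      simp [phase2]

-- A's heading scan + tail equals phase1 on the corresponding suffix
theorem aFind_eq_phase1 (lines : List String) : ∀ (m k : Nat), k ≤ lines.length → lines.length - k ≤ m →
    (match (PySem.List.enumerate (lines.drop k) (k : Int)).find?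
        (fun p => PySem.Str.strip p.2 == "## Executive Summary") with
    | none => []
    | some (hi, _) =>
      (PySem.List.pyRange (hi + 1)
          (aEndLoop lines (PySem.List.pyRange (hi + 1) (lines.length : Int) 1) (lines.length : Int)) 1).map
        (fun j => (j + 1, PySem.List.pyGetD lines j "")))
    = phase1 (lines.drop k) ((k : Int) + 1) := by
  intro m
  induction m with
  | zero =>
    intro k hk hm
    have hke : k = lines.length := by omega
    rw [hke]
    simp [List.drop_length, PySem.List.enumerate_nil, phase1]
  | succ m ih =>
    intro k hk hm
    by_cases hlt : k < lines.length
    · have hdrop : lines.drop k = lines[k] :: lines.drop (k + 1) := List.drop_eq_getElem_cons hlt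
      rw [hdrop, PySem.List.enumerate_cons]
      by_cases h : (PySem.Str.strip lines[k] == "## Executive Summary") = true
      · simp only [List.find?_cons]
        rw [h]
        simp only [phase1]
        rw [if_pos h]
        have htail := aTail_eq_phase2 lines (lines.length) (k + 1) (by omega) (by omega)
        push_cast at htail ⊢
        exact htail
      · rw [Bool.not_eq_true] at h
        simp only [List.find?_cons]
        rw [h]
        simp only [phase1]
        rw [if_neg (by simp [h])]
        have hrec := ih (k + 1) (by omega) (by omega)
        push_cast at hrec ⊢
        exact hrec
    · have hke : k = lines.length := by omega
      rw [hke]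
      simp [List.drop_length, PySem.List.enumerate_nil, phase1]

-- ===== VERDICT (by name: the statement is the Claim_ definition above) =====
theorem scope_lines_py_spec : Claim_equal_scope_lines_py := by
  intro body scope_name _
  unfold Spec_scope_lines_py scope_lines_py scope_lines_py_alt
  by_cases hs : scope_name = "executive_summary"
  · simp only [hs, ne_eq, not_true_eq_false, ite_false]
    rw [bLoop_false (PySem.Str.splitlines body) 1 []]
    have := aFind_eq_phase1 (PySem.Str.splitlines body) (PySem.Str.splitlines body).length 0 (by omega) (by omega)
    simpa using this
  · simp [hs]
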